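-- pv_equiv track=rewrite | github.com/OTOYO1020/ChatDev_Intermediate | WareHouse/E_270__20250506044911/main.py | eat_apples
-- ===== SOURCE A (Python) =====
-- def eat_apples(N, K, A):
--     """
--     Simulates eating apples from baskets.
--     Parameters:
--     N (int): The number of baskets.
--     K (int): The number of apples to eat.
--     A (list): The list containing the number of apples in each basket.
--     Returns:
--     list: The updated list of apples remaining in each basket.
--     """
--     total_eaten = 0
--     current_basket = 0
--     while total_eaten < K:
--         if A[current_basket] > 0:
--             A[current_basket] -= 1
--             total_eaten += 1
--         current_basket = (current_basket + 1) % N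
--         # Check if all baskets are empty
--         if all(apples == 0 for apples in A):
--             break  # Exit the loop if no apples are left to eat
--     return A
-- ===== SOURCE B (Python) =====
-- def eat_apples(N, K, A):
--     total = sum(a for a in A if a > 0)
--     k = min(K, total)
--     if k <= 0:
--         return A
--     lo, hi = 0, max(A, default=0)
--     while lo < hi:
--         mid = (lo + hi + 1) // 2
--         if sum(min(a, mid) for a in A if a > 0) <= k:
--             lo = mid
--         else:
--             hi = mid - 1
--     r = lo
--     rem = k - sum(min(a, r) for a in A if a > 0)
--     out = []
--     for a in A:
--         e = min(a, r) if a > 0 else 0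
--         if rem > 0 and a > e:
--             e += 1
--             rem -= 1
--         out.append(a - e)
--     return out
-- ===== Notes on version B (the rewrite author's own statement) =====
-- stated objective: alternative
-- what changed: Replaces the apple-by-apple round-robin simulation (with an all-zero scan after every single step) by a binary search for the number r of completed rounds via sum(min(a,r) over positive baskets)<=k, followed by one pass distributing the remaining apples in index order; intended as asymptotically lighter (O(N log max A) vs O(K*N)), but a timing run could not measure a ratio because A does not finish on the generator's large inputs.
-- outside the precondition, e.g. on eat_apples(1, 2, [3, 3]): A returns [1, 3], B returns [2, 2]; on eat_apples(-1, 2, [2, 2]): A returns [0, 2], B returns [1, 1]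
import Mathlib
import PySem

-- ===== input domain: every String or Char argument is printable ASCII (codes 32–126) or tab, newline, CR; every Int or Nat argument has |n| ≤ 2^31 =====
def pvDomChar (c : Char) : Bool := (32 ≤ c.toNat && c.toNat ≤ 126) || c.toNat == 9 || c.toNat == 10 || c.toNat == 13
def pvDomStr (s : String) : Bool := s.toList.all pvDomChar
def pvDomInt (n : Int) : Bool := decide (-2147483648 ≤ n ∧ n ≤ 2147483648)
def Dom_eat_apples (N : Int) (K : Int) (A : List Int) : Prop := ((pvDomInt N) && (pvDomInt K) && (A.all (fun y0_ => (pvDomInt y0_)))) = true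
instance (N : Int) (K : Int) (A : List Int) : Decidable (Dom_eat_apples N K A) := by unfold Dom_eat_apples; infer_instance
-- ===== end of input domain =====

-- B replaces A's apple-by-apple round-robin simulation by a binary search on the number of full
-- rounds plus one distribution pass (objective: alternative algorithm; intended as lighter, but
-- a timing run measured no ratio). A mutates its list argument in place; the equivalence
-- proved here is about the RETURN value only.

-- ===== PORT A =====
-- fuel is a totality guard only; on every input admitted by Pre_ it is larger than the number of
-- loop iterations the Python performs.
def eatLoopA (N K : Int) : Nat → List Int → Int → Int → List Int
  | 0, lst, _, _ => lst
  | fuel+1, lst, eaten, cur =>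
    if eaten < K then
      match PySem.List.pyGet? lst cur with
      | none => lst      -- IndexError in Python: outside Pre_
      | some v =>
        let lst' := if 0 < v then PySem.List.pySetD lst cur (v - 1) else lst
        let eaten' := if 0 < v then eaten + 1 else eaten
        let cur' := PySem.Int.mod (cur + 1) N
        if lst'.all (fun a => a == 0) then lst'
        else eatLoopA N K fuel lst' eaten' cur'
    else lst

def eat_apples (N : Int) (K : Int) (A : List Int) : List Int :=
  eatLoopA N K ((A.map Int.toNat).sum * A.length + A.length + 1) A 0 0

-- ===== PORT B =====
-- fuel is a totality guard only: the interval [lo,hi] shrinks every iteration.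
def bsLoopB (A : List Int) (k : Int) : Nat → Int → Int → Int
  | 0, lo, _ => lo
  | fuel+1, lo, hi =>
    if lo < hi then
      let mid := PySem.Int.floordiv (lo + hi + 1) 2
      if ((A.filter (fun a => decide (0 < a))).map (fun a => min a mid)).sum ≤ k then
        bsLoopB A k fuel mid hi
      else bsLoopB A k fuel lo (mid - 1)
    else lo

def distribB : List Int → Int → Int → List Int
  | [], _, _ => []
  | a :: rest, r, rem =>
    let e := if 0 < a then min a r else 0
    if 0 < rem ∧ e < a then (a - (e + 1)) :: distribB rest r (rem - 1)
    else (a - e) :: distribB rest r rem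

def eat_apples_alt (N : Int) (K : Int) (A : List Int) : List Int :=
  let total := (A.filter (fun a => decide (0 < a))).sum
  let k := min K total
  if k ≤ 0 then A
  else
    let hi := PySem.List.maxD A (fun x => x) 0
    let r := bsLoopB A k (hi.toNat + 1) 0 hi
    let rem := k - ((A.filter (fun a => decide (0 < a))).map (fun a => min a r)).sum
    distribB A r rem

-- ===== PRECONDITION & SPEC =====
-- Pre_ excludes the inputs with K > 0 on which N ≠ len(A) or N ≤ 0 (there A raises
-- IndexError / ZeroDivisionError, loops forever, or returns a value shaped by its pointer-wrap
-- accident of visiting only the index cycle of (cur+1)%N — a traversal that on many such inputs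
-- happens to eat the same apples as B, but is an artefact of N, not a specified order), and the
-- inputs with negative baskets on which K exceeds the positive apples (there A loops forever:
-- the all-zero break can never fire).
def Pre_eat_apples (N : Int) (K : Int) (A : List Int) : Prop :=
  K ≤ 0 ∨ (N = (A.length : Int) ∧ 1 ≤ N ∧
    (K ≤ (A.map (fun a => if 0 < a then a else 0)).sum ∨ ∀ a ∈ A, 0 ≤ a))
instance (N : Int) (K : Int) (A : List Int) : Decidable (Pre_eat_apples N K A) := by
  unfold Pre_eat_apples; infer_instance

def pvWitness_eat_apples : Int × Int × List Int := (3, 4, [2, 0, 3])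

def Spec_eat_apples (N : Int) (K : Int) (A : List Int) (out : List Int) : Prop := out = eat_apples_alt N K A
instance (N : Int) (K : Int) (A : List Int) (out : List Int) : Decidable (Spec_eat_apples N K A out) := by unfold Spec_eat_apples; infer_instance

-- ===== CLAIM (what is proved, stated in full; the proofs are below) =====
def Claim_equal_eat_apples : Prop := ∀ (N : Int) (K : Int) (A : List Int), Dom_eat_apples N K A → Pre_eat_apples N K A → Spec_eat_apples N K A (eat_apples N K A)

-- ===== LEMMAS AND PROOFS =====

-- abbreviations used only by the proofs
def cp (l : List Int) : Int := (l.countP (fun a => decide (0 < a)) : Int)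
def decAll (l : List Int) : List Int := l.map (fun a => if 0 < a then a - 1 else a)
def decFirst (k : Int) : List Int → List Int
  | [] => []
  | a :: rest => if 0 < k ∧ 0 < a then (a - 1) :: decFirst (k - 1) rest
                 else a :: decFirst k rest
def sumToNat (l : List Int) : Nat := (l.map Int.toNat).sum
def S (l : List Int) (r : Int) : Int := (l.map (fun a => if 0 < a then min a r else 0)).sum

lemma sumToNat_decAll_le (l : List Int) : sumToNat (decAll l) ≤ sumToNat l := by
  induction l with
  | nil => simp [sumToNat, decAll]
  | cons a t ih =>
    simp only [sumToNat, decAll, List.map_cons, List.sum_cons] at *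
    have : (if 0 < a then a - 1 else a).toNat ≤ a.toNat := by split_ifs <;> omega
    omega

lemma sumToNat_decAll_lt (l : List Int) (h : l.countP (fun a => decide (0 < a)) ≠ 0) :
    sumToNat (decAll l) < sumToNat l := by
  induction l with
  | nil => simp at h
  | cons a t ih =>
    rw [List.countP_cons] at h
    by_cases ha : 0 < a
    · have h1 : (if 0 < a then a - 1 else a).toNat < a.toNat := by split_ifs <;> omega
      have h2 := sumToNat_decAll_le t
      simp only [sumToNat, decAll, List.map_cons, List.sum_cons] at *
      omega
    · have h3 : t.countP (fun a => decide (0 < a)) ≠ 0 := by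
        intro h0; apply h; rw [h0]; simp [ha]
      have := ih h3
      have h1 : (if 0 < a then a - 1 else a).toNat ≤ a.toNat := by split_ifs <;> omega
      simp only [sumToNat, decAll, List.map_cons, List.sum_cons] at *
      omega

-- the mathematical meaning of A's loop (round-at-a-time)
def resultFn (lst : List Int) (k : Int) : List Int :=
  if k ≤ 0 then lst
  else if h2 : lst.countP (fun a => decide (0 < a)) = 0 then lst
  else if k ≤ cp lst then decFirst k lst
  else resultFn (decAll lst) (k - cp lst)
termination_by sumToNat lst
decreasing_by exact sumToNat_decAll_lt lst h2

lemma cp_nil : cp [] = 0 := rfl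

lemma cp_cons (a : Int) (t : List Int) :
    cp (a :: t) = (if 0 < a then 1 else 0) + cp t := by
  by_cases ha : 0 < a <;> simp [cp, List.countP_cons, ha] <;> push_cast <;> omega

lemma cp_nonneg (l : List Int) : 0 ≤ cp l := by
  simp [cp]

lemma decFirst_nonpos (l : List Int) (k : Int) (h : k ≤ 0) : decFirst k l = l := by
  induction l generalizing k with
  | nil => rfl
  | cons a t ih => simp only [decFirst]; rw [if_neg (by omega)]; simp [ih _ h]

lemma eatLoopA_guard_false (N K : Int) (f : Nat) (lst : List Int) (eaten cur : Int)
    (hf : 1 ≤ f) (h : ¬ eaten < K) : eatLoopA N K f lst eaten cur = lst := by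
  cases f with
  | zero => omega
  | succ g => simp [eatLoopA, h]

lemma eatLoopA_allZero (N K : Int) (f : Nat) (lst : List Int) (eaten : Int)
    (hf : 1 ≤ f) (hz : lst.all (fun a => a == 0) = true) (hne : lst ≠ []) :
    eatLoopA N K f lst eaten 0 = lst := by
  cases f with
  | zero => omega
  | succ g =>
    cases lst with
    | nil => exact absurd rfl hne
    | cons x xs =>
      have hx : x = 0 := by simp [List.all_cons] at hz; exact hz.1
      subst hx
      by_cases hK : eaten < K
      · simp [eatLoopA, hK, hz]
      · simp [eatLoopA, hK]

lemma set_append_len {α : Type} (done : List α) (v x : α) (rest : List α) :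
    (done ++ v :: rest).set done.length x = done ++ x :: rest := by
  induction done with
  | nil => rfl
  | cons d t ih => simpa using ih

lemma eatLoopA_step (N K : Int) (f : Nat) (lst : List Int) (eaten cur v : Int)
    (hK : eaten < K) (hget : PySem.List.pyGet? lst cur = some v) :
    eatLoopA N K (f + 1) lst eaten cur =
      (if (if 0 < v then PySem.List.pySetD lst cur (v - 1) else lst).all (fun a => a == 0)
       then (if 0 < v then PySem.List.pySetD lst cur (v - 1) else lst)
       else eatLoopA N K f (if 0 < v then PySem.List.pySetD lst cur (v - 1) else lst)
              (if 0 < v then eaten + 1 else eaten) (PySem.Int.mod (cur + 1) N)) := by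
  simp only [eatLoopA, if_pos hK, hget]

lemma mod_self_eq (n : Int) (h : 0 < n) : PySem.Int.mod n n = 0 := by
  rw [PySem.Int.mod_eq_emod_of_pos h]; exact Int.emod_self

lemma mod_small (a n : Int) (h0 : 0 ≤ a) (h : a < n) : PySem.Int.mod a n = a := by
  rw [PySem.Int.mod_eq_emod_of_pos (by omega)]; exact Int.emod_eq_of_lt h0 h

lemma all_zero_iff (l : List Int) : (l.all (fun a => a == 0) = true) ↔ ∀ a ∈ l, a = 0 := by
  simp

lemma cp_zero_of_all_zero (l : List Int) (h : ∀ a ∈ l, a = 0) : cp l = 0 := by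
  have : l.countP (fun a => decide (0 < a)) = 0 := by
    rw [List.countP_eq_zero]
    intro a ha
    have := h a ha
    simp [this]
  simp [cp, this]

lemma decAll_all_zero (l : List Int) (h : ∀ a ∈ l, a = 0) : decAll l = l := by
  unfold decAll
  conv_rhs => rw [show l = l.map id from (List.map_id l).symm]
  apply List.map_congr_left
  intro a ha
  have := h a ha
  simp [this]

lemma decFirst_cons_pos (k v : Int) (rest : List Int) (hk : 0 < k) (hv : 0 < v) :
    decFirst k (v :: rest) = (v - 1) :: decFirst (k - 1) rest := by
  simp only [decFirst]; rw [if_pos ⟨hk, hv⟩]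

lemma decFirst_cons_neg (k v : Int) (rest : List Int) (h : ¬(0 < k ∧ 0 < v)) :
    decFirst k (v :: rest) = v :: decFirst k rest := by
  simp only [decFirst]; rw [if_neg h]

lemma decAll_cons (v : Int) (rest : List Int) :
    decAll (v :: rest) = (if 0 < v then v - 1 else v) :: decAll rest := by
  simp [decAll]

lemma half (K N : Int) : ∀ (todo done : List Int) (eaten : Int) (f : Nat),
    todo ≠ [] →
    N = (done.length : Int) + todo.length →
    eaten < K → 1 ≤ f →
    eatLoopA N K (f + todo.length) (done ++ todo) eaten (done.length : Int) =
      if K - eaten ≤ cp todo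
      then done ++ decFirst (K - eaten) todo
      else eatLoopA N K f (done ++ decAll todo) (eaten + cp todo) 0 := by
  intro todo
  induction todo with
  | nil => intro done eaten f h; exact absurd rfl h
  | cons v rest ih =>
    intro done eaten f _ hN hK hf
    have hget : PySem.List.pyGet? (done ++ v :: rest) (done.length : Int) = some v :=
      PySem.List.pyGet?_append_length done rest v
    rw [show f + (v :: rest).length = (f + rest.length) + 1 by simp [Nat.add_assoc],
        eatLoopA_step N K (f + rest.length) _ eaten _ v hK hget]
    by_cases hv : 0 < v
    · have hset : PySem.List.pySetD (done ++ v :: rest) ((done.length : Nat) : Int) (v - 1)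
          = done ++ (v - 1) :: rest := by
        rw [PySem.List.pySetD_natCast, set_append_len]
      simp only [if_pos hv, hset]
      by_cases hz : (done ++ (v - 1) :: rest).all (fun a => a == 0) = true
      · rw [if_pos hz]
        have hall := (all_zero_iff _).mp hz
        have hrz : ∀ a ∈ rest, a = 0 := fun a ha => hall a (by simp [ha])
        have hcpr : cp rest = 0 := cp_zero_of_all_zero rest hrz
        have hcp : cp (v :: rest) = 1 := by rw [cp_cons, if_pos hv, hcpr]; norm_num
        by_cases hk1 : K - eaten ≤ cp (v :: rest)
        · rw [if_pos hk1]
          rw [decFirst_cons_pos _ _ _ (by omega) hv,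
              decFirst_nonpos rest _ (by rw [hcp] at hk1; omega)]
        · rw [if_neg hk1, decAll_cons, if_pos hv, decAll_all_zero rest hrz, hcp]
          exact (eatLoopA_allZero N K f _ (eaten + 1) hf hz (by simp)).symm
      · rw [if_neg hz]
        cases rest with
        | nil =>
          have hmod : PySem.Int.mod ((done.length : Int) + 1) N = 0 := by
            rw [show N = (done.length : Int) + 1 by rw [hN]; simp]
            exact mod_self_eq _ (by omega)
          rw [hmod]
          have hcp : cp [v] = 1 := by rw [cp_cons, if_pos hv, cp_nil]; norm_num
          by_cases hk1 : K - eaten ≤ cp [v]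
          · rw [if_pos hk1]
            rw [eatLoopA_guard_false N K (f + List.length ([] : List Int)) _ _ _
                  (by simpa using hf) (by rw [hcp] at hk1; omega)]
            rw [decFirst_cons_pos _ _ _ (by omega) hv, decFirst_nonpos _ _ (by rw [hcp] at hk1; omega)]
          · rw [if_neg hk1, decAll_cons, if_pos hv, hcp]
            simp [decAll]
        | cons w rest' =>
          have hmod : PySem.Int.mod ((done.length : Int) + 1) N = (done.length : Int) + 1 := by
            apply mod_small _ _ (by positivity)
            rw [hN]; simp only [List.length_cons]; push_cast; omega
          rw [hmod]
          have hcpc : cp (v :: w :: rest') = 1 + cp (w :: rest') := by rw [cp_cons, if_pos hv]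
          have hcpn := cp_nonneg (w :: rest')
          by_cases hke : eaten + 1 < K
          · have hih := ih (done ++ [v - 1]) (eaten + 1) f (by simp)
              (by rw [hN]; push_cast; simp; ring) hke hf
            rw [show ((done ++ [v - 1]).length : Int) = (done.length : Int) + 1 by
                  simp] at hih
            rw [show (done ++ [v - 1]) ++ w :: rest' = done ++ (v - 1) :: w :: rest' by simp] at hih
            rw [hih]
            by_cases hk1 : K - eaten ≤ cp (v :: w :: rest')
            · rw [if_pos hk1, if_pos (show K - (eaten + 1) ≤ cp (w :: rest') by omega)]
              rw [decFirst_cons_pos _ _ _ (by omega) hv,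
                  show K - (eaten + 1) = K - eaten - 1 by ring]
              simp
            · rw [if_neg hk1, if_neg (show ¬(K - (eaten + 1) ≤ cp (w :: rest')) by omega)]
              rw [decAll_cons v (w :: rest'), if_pos hv,
                  show eaten + 1 + cp (w :: rest') = eaten + (1 + cp (w :: rest')) by ring, ← hcpc]
              simp
          · rw [eatLoopA_guard_false N K (f + (w :: rest').length) _ _ _ (by omega) (by omega)]
            rw [if_pos (show K - eaten ≤ cp (v :: w :: rest') by omega)]
            rw [decFirst_cons_pos _ _ _ (by omega) hv, decFirst_nonpos _ _ (by omega)]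
    · simp only [if_neg hv]
      by_cases hz : (done ++ v :: rest).all (fun a => a == 0) = true
      · rw [if_pos hz]
        have hall := (all_zero_iff _).mp hz
        have hcp : cp (v :: rest) = 0 :=
          cp_zero_of_all_zero _ (fun a ha => hall a (by simp [List.mem_cons.mp ha]))
        rw [if_neg (show ¬(K - eaten ≤ cp (v :: rest)) by rw [hcp]; omega)]
        rw [decAll_all_zero (v :: rest) (fun a ha => hall a (by simp [List.mem_cons.mp ha])), hcp,
            add_zero]
        exact (eatLoopA_allZero N K f _ eaten hf hz (by simp)).symm
      · rw [if_neg hz]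
        cases rest with
        | nil =>
          have hmod : PySem.Int.mod ((done.length : Int) + 1) N = 0 := by
            rw [show N = (done.length : Int) + 1 by rw [hN]; simp]
            exact mod_self_eq _ (by omega)
          rw [hmod]
          have hcp : cp [v] = 0 := by rw [cp_cons, if_neg hv, cp_nil]; norm_num
          rw [if_neg (show ¬(K - eaten ≤ cp [v]) by rw [hcp]; omega)]
          rw [decAll_cons, if_neg hv, hcp, add_zero]
          simp [decAll]
        | cons w rest' =>
          have hmod : PySem.Int.mod ((done.length : Int) + 1) N = (done.length : Int) + 1 := by
            apply mod_small _ _ (by positivity)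
            rw [hN]; simp only [List.length_cons]; push_cast; omega
          rw [hmod]
          have hcpc : cp (v :: w :: rest') = cp (w :: rest') := by
            rw [cp_cons, if_neg hv]; ring
          have hih := ih (done ++ [v]) eaten f (by simp)
            (by rw [hN]; push_cast; simp; ring) hK hf
          rw [show ((done ++ [v]).length : Int) = (done.length : Int) + 1 by simp] at hih
          rw [show (done ++ [v]) ++ w :: rest' = done ++ v :: w :: rest' by simp] at hih
          rw [hih]
          by_cases hk1 : K - eaten ≤ cp (v :: w :: rest')
          · rw [if_pos hk1, if_pos (show K - eaten ≤ cp (w :: rest') by omega)]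
            rw [decFirst_cons_neg (K - eaten) v (w :: rest') (by tauto)]
            simp
          · rw [if_neg hk1, if_neg (show ¬(K - eaten ≤ cp (w :: rest')) by omega)]
            rw [decAll_cons v (w :: rest'), if_neg hv, ← hcpc]
            simp

lemma cp_eq_zero_all_zero (l : List Int) (h : ∀ a ∈ l, 0 ≤ a)
    (hc : l.countP (fun a => decide (0 < a)) = 0) : ∀ a ∈ l, a = 0 := by
  intro a ha
  have h1 := List.countP_eq_zero.mp hc a ha
  have h2 := h a ha
  simp at h1
  omega

lemma decAll_nonneg (l : List Int) (h : ∀ a ∈ l, 0 ≤ a) : ∀ a ∈ decAll l, 0 ≤ a := by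
  intro a ha
  simp only [decAll, List.mem_map] at ha
  obtain ⟨x, hx, rfl⟩ := ha
  have := h x hx
  split_ifs <;> omega

lemma sum_zero_of_all_zero (l : List Int) (h : ∀ a ∈ l, a = 0) : l.sum = 0 := by
  induction l with
  | nil => simp
  | cons a t ih =>
    have := h a (by simp)
    simp only [List.sum_cons, this, zero_add]
    exact ih (fun x hx => h x (by simp [hx]))

def PS (l : List Int) : Int := (l.map (fun a => if 0 < a then a else 0)).sum

lemma PS_cons (a : Int) (t : List Int) : PS (a :: t) = (if 0 < a then a else 0) + PS t := by
  simp [PS]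

lemma PS_decAll (l : List Int) : PS (decAll l) = PS l - cp l := by
  induction l with
  | nil => simp [PS, decAll, cp]
  | cons a t ih =>
    simp only [decAll, List.map_cons] at *
    rw [PS_cons, PS_cons, cp_cons, ih]
    split_ifs <;> omega

lemma main (K : Int) : ∀ (s : Nat) (lst : List Int) (eaten : Int) (f : Nat),
    sumToNat lst ≤ s → (K - eaten ≤ PS lst ∨ ∀ a ∈ lst, 0 ≤ a) → lst ≠ [] → 1 ≤ f →
    eatLoopA (lst.length : Int) K (f + s * lst.length + lst.length) lst eaten 0 =
      resultFn lst (K - eaten) := by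
  intro s
  induction s using Nat.strong_induction_on with
  | _ s ihs =>
    intro lst eaten f hs hgood hne hf
    by_cases hK : eaten < K
    case neg =>
      rw [eatLoopA_guard_false _ _ _ _ _ _ (by omega) hK, resultFn, if_pos (by omega)]
    case pos =>
      have hhalf := half K (lst.length : Int) lst [] eaten (f + s * lst.length) hne
        (by simp) hK (by omega)
      simp only [List.nil_append, List.length_nil, Nat.cast_zero] at hhalf
      rw [hhalf]
      by_cases hk1 : K - eaten ≤ cp lst
      · rw [if_pos hk1, resultFn]
        have hcp0 : lst.countP (fun a => decide (0 < a)) ≠ 0 := by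
          intro h0
          have : cp lst = 0 := by simp [cp, h0]
          omega
        rw [if_neg (by omega), dif_neg hcp0, if_pos hk1]
      · rw [if_neg hk1]
        by_cases hcp0 : lst.countP (fun a => decide (0 < a)) = 0
        · have hcpz : cp lst = 0 := by simp [cp, hcp0]
          rcases hgood with hgd | hnn
          · exfalso
            have hPSz : PS lst = 0 := by
              have h1 : ∀ a ∈ lst, ¬(0 < a) := by
                intro a ha
                have := List.countP_eq_zero.mp hcp0 a ha
                simpa using this
              have : ∀ x ∈ lst.map (fun a => if 0 < a then a else 0), x = 0 := by
                intro x hx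
                simp only [List.mem_map] at hx
                obtain ⟨a, ha, rfl⟩ := hx
                simp [h1 a ha]
              simpa [PS] using sum_zero_of_all_zero _ this
            omega
          · have hallz : ∀ a ∈ lst, a = 0 := cp_eq_zero_all_zero lst hnn hcp0
            rw [decAll_all_zero lst hallz, hcpz, add_zero]
            rw [eatLoopA_allZero _ _ _ _ _ (by omega) ((all_zero_iff lst).mpr hallz) hne]
            rw [resultFn, if_neg (by omega), dif_pos hcp0]
        · have hcpp : 0 < cp lst := by
            have h1 := cp_nonneg lst
            have : cp lst ≠ 0 := by
              intro h0
              apply hcp0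
              have := h0
              simp only [cp] at this
              exact_mod_cast this
            omega
          have hlt := sumToNat_decAll_lt lst hcp0
          obtain ⟨s', rfl⟩ : ∃ s', s = s' + 1 := ⟨s - 1, by omega⟩
          have hlen : (decAll lst).length = lst.length := by simp [decAll]
          have hPSd := PS_decAll lst
          have hrec := ihs s' (by omega) (decAll lst) (eaten + cp lst) f
            (by omega)
            (by rcases hgood with hgd | hnn
                · left; omega
                · exact Or.inr (decAll_nonneg lst hnn))
            (by simp only [decAll, ne_eq, List.map_eq_nil_iff]; exact hne) hf
          rw [hlen] at hrec
          rw [show f + (s' + 1) * lst.length = f + s' * lst.length + lst.length by ring]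
          rw [hrec]
          conv_rhs => rw [resultFn]
          rw [if_neg (by omega), dif_neg hcp0, if_neg hk1,
              show K - (eaten + cp lst) = K - eaten - cp lst by ring]

-- B side
lemma S_cons (a : Int) (t : List Int) (r : Int) :
    S (a :: t) r = (if 0 < a then min a r else 0) + S t r := by
  simp [S]

lemma S_filter (l : List Int) (r : Int) :
    ((l.filter (fun a => decide (0 < a))).map (fun a => min a r)).sum = S l r := by
  induction l with
  | nil => rfl
  | cons a t ih =>
    rw [List.filter_cons, S_cons]
    by_cases ha : 0 < a <;> simp [ha, ih]

lemma PS_filter (l : List Int) :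
    (l.filter (fun a => decide (0 < a))).sum = PS l := by
  induction l with
  | nil => rfl
  | cons a t ih =>
    rw [List.filter_cons, PS_cons]
    by_cases ha : 0 < a <;> simp [ha, ih]

lemma PS_nonneg (l : List Int) : 0 ≤ PS l := by
  induction l with
  | nil => simp [PS]
  | cons a t ih => rw [PS_cons]; split_ifs <;> omega

lemma S_one (l : List Int) : S l 1 = cp l := by
  induction l with
  | nil => rfl
  | cons a t ih => rw [S_cons, cp_cons, ih]; split_ifs with hp <;> omega

lemma S_mono (l : List Int) (r r' : Int) (h : r ≤ r') : S l r ≤ S l r' := by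
  induction l with
  | nil => simp [S]
  | cons a t ih => rw [S_cons, S_cons]; split_ifs <;> omega

lemma S_zero (l : List Int) : S l 0 = 0 := by
  induction l with
  | nil => rfl
  | cons a t ih => rw [S_cons, ih]; split_ifs <;> omega

lemma S_nonneg (l : List Int) (r : Int) (hr : 0 ≤ r) : 0 ≤ S l r := by
  induction l with
  | nil => simp [S]
  | cons a t ih => rw [S_cons]; split_ifs <;> omega

lemma S_eq_zero_pointwise (l : List Int) (r : Int) (hr : 0 ≤ r) (hz : S l r = 0) :
    ∀ a ∈ l, (if 0 < a then min a r else 0) = 0 := by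
  induction l with
  | nil => simp
  | cons a t ih =>
    rw [S_cons] at hz
    have h1 : 0 ≤ S t r := S_nonneg t r hr
    have h2 : 0 ≤ (if 0 < a then min a r else 0) := by split_ifs <;> omega
    intro x hx
    rcases List.mem_cons.mp hx with rfl | hx'
    · omega
    · exact ih (by omega) x hx'

lemma cp_le_PS (l : List Int) : cp l ≤ PS l := by
  induction l with
  | nil => simp [cp, PS]
  | cons a t ih => rw [cp_cons, PS_cons]; split_ifs <;> omega

lemma S_decAll (l : List Int) (r : Int) (hr : 1 ≤ r) :
    S (decAll l) (r - 1) = S l r - cp l := by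
  induction l with
  | nil => simp [S, decAll, cp]
  | cons a t ih =>
    simp only [decAll, List.map_cons] at *
    rw [S_cons, S_cons, cp_cons, ih]
    split_ifs <;> omega

lemma minr_eq_min1 (l : List Int) (r : Int) (hr : 1 ≤ r) (h : S l r ≤ S l 1) :
    ∀ a ∈ l, 0 < a → min a r = min a 1 := by
  induction l with
  | nil => simp
  | cons a t ih =>
    rw [S_cons, S_cons] at h
    have h1 : S t 1 ≤ S t r := S_mono t 1 r hr
    have h2 : (if 0 < a then min a (1:Int) else 0) ≤ (if 0 < a then min a r else 0) := by
      split_ifs <;> omega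
    intro x hx hxp
    rcases List.mem_cons.mp hx with rfl | hx'
    · simp only [if_pos hxp] at h h2
      omega
    · exact ih (by omega) x hx' hxp

lemma distribB_zero_eq_map (l : List Int) (r : Int) :
    distribB l r 0 = l.map (fun a => a - (if 0 < a then min a r else 0)) := by
  induction l with
  | nil => rfl
  | cons a t ih => simp [distribB, ih]

lemma distribB_zero_rem (l : List Int) (r : Int)
    (h : ∀ a ∈ l, (if 0 < a then min a r else 0) = 0) :
    distribB l r 0 = l := by
  rw [distribB_zero_eq_map]
  conv_rhs => rw [show l = l.map id from (List.map_id l).symm]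
  apply List.map_congr_left
  intro a ha
  have := h a ha
  simp [this]

lemma distribB_r_zero (l : List Int) (k : Int) :
    distribB l 0 k = decFirst k l := by
  induction l generalizing k with
  | nil => rfl
  | cons a t ih =>
    have he : (if 0 < a then min a (0:Int) else 0) = 0 := by split_ifs <;> omega
    simp only [distribB, decFirst, he]
    split_ifs with hc
    · rw [ih (k - 1)]; norm_num
    · rw [ih k]; norm_num

lemma decFirst_all (l : List Int) (k : Int) (h : cp l ≤ k) :
    decFirst k l = decAll l := by
  induction l generalizing k with
  | nil => rfl
  | cons a t ih =>
    rw [cp_cons] at h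
    have hcp := cp_nonneg t
    by_cases ha : 0 < a
    · simp only [decFirst, decAll, List.map_cons]
      rw [if_pos ⟨by simp [ha] at h; omega, ha⟩, if_pos ha]
      have := ih (k - 1) (by simp [ha] at h; omega)
      simp [decAll] at this
      simp [this]
    · simp only [decFirst, decAll, List.map_cons]
      rw [if_neg (by tauto), if_neg ha]
      have := ih k (by simp [ha] at h; omega)
      simp [decAll] at this
      simp [this]

lemma distribB_decAll (l : List Int) (r : Int) (hr : 1 ≤ r) :
    ∀ rem, distribB l r rem = distribB (decAll l) (r - 1) rem := by
  induction l with
  | nil => intro rem; rfl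
  | cons a t ih =>
    intro rem
    rw [decAll_cons]
    show (if 0 < rem ∧ (if 0 < a then min a r else 0) < a
          then (a - ((if 0 < a then min a r else 0) + 1)) :: distribB t r (rem - 1)
          else (a - (if 0 < a then min a r else 0)) :: distribB t r rem)
        = (if 0 < rem ∧ (if 0 < (if 0 < a then a - 1 else a)
                then min (if 0 < a then a - 1 else a) (r - 1) else 0) <
                (if 0 < a then a - 1 else a)
          then ((if 0 < a then a - 1 else a) -
                ((if 0 < (if 0 < a then a - 1 else a)
                  then min (if 0 < a then a - 1 else a) (r - 1) else 0) + 1)) ::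
                distribB (decAll t) (r - 1) (rem - 1)
          else ((if 0 < a then a - 1 else a) -
                (if 0 < (if 0 < a then a - 1 else a)
                 then min (if 0 < a then a - 1 else a) (r - 1) else 0)) ::
                distribB (decAll t) (r - 1) rem)
    have hiff : (0 < rem ∧ (if 0 < a then min a r else 0) < a) ↔
        (0 < rem ∧ (if 0 < (if 0 < a then a - 1 else a)
            then min (if 0 < a then a - 1 else a) (r - 1) else 0) <
            (if 0 < a then a - 1 else a)) := by
      constructor <;> rintro ⟨u, v⟩ <;> refine ⟨u, ?_⟩ <;> split_ifs at v ⊢ <;> omega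
    by_cases hc : 0 < rem ∧ (if 0 < a then min a r else 0) < a
    · rw [if_pos hc, if_pos (hiff.mp hc), ih (rem - 1)]
      congr 1
      split_ifs <;> omega
    · rw [if_neg hc, if_neg (fun h => hc (hiff.mpr h)), ih rem]
      congr 1
      split_ifs <;> omega

lemma PS_zero_of_no_pos (l : List Int) (h : l.countP (fun a => decide (0 < a)) = 0) :
    PS l = 0 := by
  induction l with
  | nil => rfl
  | cons a t ih =>
    rw [List.countP_cons] at h
    rw [PS_cons]
    by_cases ha : 0 < a
    · exfalso; simp [ha] at h
    · have ht : t.countP (fun a => decide (0 < a)) = 0 := by simpa [ha] using h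
      rw [if_neg ha, ih ht, add_zero]

lemma CF : ∀ (s : Nat) (lst : List Int) (Kk r : Int),
    sumToNat lst ≤ s → 0 ≤ r →
    S lst r ≤ min Kk (PS lst) →
    (min Kk (PS lst) < S lst (r + 1) ∨ ∀ a ∈ lst, a ≤ r) →
    resultFn lst Kk = distribB lst r (min Kk (PS lst) - S lst r) := by
  intro s
  induction s using Nat.strong_induction_on with
  | _ s ihs =>
    intro lst Kk r hs hr hSr hdis
    set k := min Kk (PS lst) with hk
    have hPS0 : 0 ≤ PS lst := PS_nonneg lst
    have hS0 : 0 ≤ S lst r := S_nonneg lst r hr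
    have hk0 : 0 ≤ k := le_trans hS0 hSr
    by_cases hKk : Kk ≤ 0
    · have hkk : k = 0 := by have := min_le_left Kk (PS lst); omega
      have hSz : S lst r = 0 := by omega
      rw [resultFn, if_pos hKk, hkk, hSz, sub_zero]
      exact (distribB_zero_rem lst r (S_eq_zero_pointwise lst r hr hSz)).symm
    · push_neg at hKk
      by_cases hcp0 : lst.countP (fun a => decide (0 < a)) = 0
      · have hPSz : PS lst = 0 := PS_zero_of_no_pos lst hcp0
        have hkk : k = 0 := by rw [hk, hPSz]; omega
        have hSz : S lst r = 0 := by omega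
        rw [resultFn, if_neg (by omega), dif_pos hcp0, hkk, hSz, sub_zero]
        exact (distribB_zero_rem lst r (S_eq_zero_pointwise lst r hr hSz)).symm
      · have hcpp : 0 < cp lst := by
          have h1 := cp_nonneg lst
          have h2 : cp lst ≠ 0 := by
            simp only [cp, ne_eq, Nat.cast_eq_zero]
            exact hcp0
          omega
        have hS1 : S lst 1 = cp lst := S_one lst
        have hcps : cp lst ≤ PS lst := cp_le_PS lst
        by_cases hk1 : Kk ≤ cp lst
        · have hkK : k = Kk := by rw [hk]; omega
          rw [resultFn, if_neg (by omega), dif_neg hcp0, if_pos hk1]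
          by_cases hr0 : r = 0
          · subst hr0
            rw [S_zero, hkK, sub_zero, distribB_r_zero]
          · have hr1 : 1 ≤ r := by omega
            have hSge : S lst 1 ≤ S lst r := S_mono lst 1 r hr1
            have hrem : k - S lst r = 0 := by omega
            rw [hrem, distribB_zero_eq_map, decFirst_all lst Kk (by omega)]
            have hmm := minr_eq_min1 lst r hr1 (by omega)
            unfold decAll
            apply List.map_congr_left
            intro a ha
            by_cases hp : 0 < a
            · rw [if_pos hp, if_pos hp, hmm a ha hp]
              omega
            · rw [if_neg hp, if_neg hp]
              omega
        · push_neg at hk1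
          have hr1 : 1 ≤ r := by
            by_contra h0
            have hr00 : r = 0 := by omega
            subst hr00
            rcases hdis with hd | hd
            · rw [show (0:Int) + 1 = 1 by ring, hS1] at hd
              omega
            · apply hcp0
              rw [List.countP_eq_zero]
              intro a ha
              have := hd a ha
              simp
              omega
          have hlt := sumToNat_decAll_lt lst hcp0
          have hPS' : PS (decAll lst) = PS lst - cp lst := PS_decAll lst
          have hk' : min (Kk - cp lst) (PS (decAll lst)) = k - cp lst := by
            rw [hPS', hk]; omega
          have hS' : S (decAll lst) (r - 1) = S lst r - cp lst := S_decAll lst r hr1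
          have hS'' : S (decAll lst) (r - 1 + 1) = S lst (r + 1) - cp lst := by
            have h3 := S_decAll lst (r + 1) (by omega)
            rw [show r + 1 - 1 = r by ring] at h3
            rw [show r - 1 + 1 = r by ring, h3]
          obtain ⟨s', rfl⟩ : ∃ s', s = s' + 1 := ⟨s - 1, by omega⟩
          have hrec := ihs s' (by omega) (decAll lst) (Kk - cp lst) (r - 1) (by omega) (by omega)
            (by rw [hk', hS']; omega)
            (by rcases hdis with hd | hd
                · left; rw [hk', hS'']; omega
                · right
                  intro a ha
                  simp only [decAll, List.mem_map] at ha
                  obtain ⟨x, hx, rfl⟩ := ha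
                  have := hd x hx
                  split_ifs <;> omega)
          rw [resultFn, if_neg (by omega), dif_neg hcp0, if_neg (by omega), hrec, hk', hS',
              show k - cp lst - (S lst r - cp lst) = k - S lst r by ring]
          exact (distribB_decAll lst r hr1 (k - S lst r)).symm

lemma bs_inv (A : List Int) (k M : Int) :
    ∀ (fuel : Nat) (lo hi : Int), 0 ≤ lo → lo ≤ hi → hi ≤ M →
    S A lo ≤ k → (hi < M → k < S A (hi + 1)) → (hi - lo).toNat < fuel →
    0 ≤ bsLoopB A k fuel lo hi ∧ bsLoopB A k fuel lo hi ≤ M ∧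
      S A (bsLoopB A k fuel lo hi) ≤ k ∧
      (bsLoopB A k fuel lo hi < M → k < S A (bsLoopB A k fuel lo hi + 1)) := by
  intro fuel
  induction fuel with
  | zero => intro lo hi h0 h1 h2 h3 h4 h5; omega
  | succ g ih =>
    intro lo hi h0 h1 h2 h3 h4 h5
    by_cases hlh : lo < hi
    · have hmid1 : lo + 1 ≤ PySem.Int.floordiv (lo + hi + 1) 2 :=
        (PySem.Int.le_floordiv_iff_mul_le (by norm_num)).mpr (by omega)
      have hmid2 : PySem.Int.floordiv (lo + hi + 1) 2 < hi + 1 :=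
        (PySem.Int.floordiv_lt_iff_lt_mul (by norm_num)).mpr (by omega)
      set mid := PySem.Int.floordiv (lo + hi + 1) 2 with hmiddef
      have hstep : bsLoopB A k (g + 1) lo hi =
          if ((A.filter (fun a => decide (0 < a))).map (fun a => min a mid)).sum ≤ k then
            bsLoopB A k g mid hi
          else bsLoopB A k g lo (mid - 1) := by
        rw [show bsLoopB A k (g + 1) lo hi =
          (if lo < hi then
            if ((A.filter (fun a => decide (0 < a))).map
                (fun a => min a (PySem.Int.floordiv (lo + hi + 1) 2))).sum ≤ k then
              bsLoopB A k g (PySem.Int.floordiv (lo + hi + 1) 2) hi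
            else bsLoopB A k g lo (PySem.Int.floordiv (lo + hi + 1) 2 - 1)
          else lo) from rfl, if_pos hlh]
      by_cases hS : ((A.filter (fun a => decide (0 < a))).map (fun a => min a mid)).sum ≤ k
      · have hSm : S A mid ≤ k := by rw [← S_filter]; exact hS
        have hrec := ih mid hi (by omega) (by omega) h2 hSm h4 (by omega)
        rw [hstep, if_pos hS]
        exact hrec
      · have hS' : k < S A mid := by rw [← S_filter]; omega
        have hrec := ih lo (mid - 1) h0 (by omega) (by omega) h3
          (by intro _; rw [show mid - 1 + 1 = mid by ring]; exact hS') (by omega)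
        rw [hstep, if_neg hS]
        exact hrec
    · have : lo = hi := by omega
      subst this
      simp only [bsLoopB, if_neg hlh]
      exact ⟨h0, h2, h3, h4⟩

lemma le_maxD (A : List Int) : ∀ a ∈ A, a ≤ PySem.List.maxD A (fun x => x) 0 := by
  intro a ha
  cases hA : PySem.List.max? A (fun x => x) with
  | none =>
    rw [PySem.List.max?_eq_none_iff] at hA
    subst hA; simp at ha
  | some m =>
    have := PySem.List.max?_isMax hA a ha
    simp only [PySem.List.maxD, hA, Option.getD_some]
    exact this

lemma pos_of_PS_pos (l : List Int) (h : 0 < PS l) : ∃ a ∈ l, 0 < a := by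
  induction l with
  | nil => simp [PS] at h
  | cons a t ih =>
    rw [PS_cons] at h
    by_cases ha : 0 < a
    · exact ⟨a, by simp, ha⟩
    · rw [if_neg ha, zero_add] at h
      obtain ⟨x, hx, hxp⟩ := ih h
      exact ⟨x, by simp [hx], hxp⟩

lemma PS_eq_zero_cp (l : List Int) (h : PS l ≤ 0) :
    l.countP (fun a => decide (0 < a)) = 0 := by
  have h1 := cp_le_PS l
  have h2 := cp_nonneg l
  have h3 : cp l = 0 := by omega
  simpa [cp] using h3

lemma alt_eq_resultFn (N K : Int) (A : List Int) :
    eat_apples_alt N K A = resultFn A K := by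
  simp only [eat_apples_alt]
  rw [PS_filter]
  by_cases hk : min K (PS A) ≤ 0
  · rw [if_pos hk]
    by_cases hK : K ≤ 0
    · rw [resultFn, if_pos hK]
    · have hcp0 : A.countP (fun a => decide (0 < a)) = 0 := by
        apply PS_eq_zero_cp
        omega
      rw [resultFn, if_neg hK, dif_pos hcp0]
  · rw [if_neg hk]
    have hPSpos : 0 < PS A := by have := min_le_right K (PS A); omega
    have hM := le_maxD A
    have hM0 : 0 ≤ PySem.List.maxD A (fun x => x) 0 := by
      obtain ⟨a0, ha0, hap⟩ := pos_of_PS_pos A hPSpos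
      have := hM a0 ha0
      omega
    set M := PySem.List.maxD A (fun x => x) 0 with hMdef
    have hbs := bs_inv A (min K (PS A)) M (M.toNat + 1) 0 M (le_refl 0) hM0 (le_refl M)
      (by rw [S_zero]; omega)
      (by intro hMM; omega)
      (by omega)
    set r := bsLoopB A (min K (PS A)) (M.toNat + 1) 0 M with hrdef
    obtain ⟨hr0, hrM, hrS, hrT⟩ := hbs
    have hcf := CF (sumToNat A) A K r (le_refl _) hr0 hrS
      (by by_cases hrM' : r < M
          · exact Or.inl (hrT hrM')
          · right
            intro a ha
            have := hM a ha
            omega)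
    rw [S_filter]
    exact hcf.symm

-- ===== VERDICT (by name: the statement is the Claim_ definition above) =====
theorem eat_apples_spec : Claim_equal_eat_apples := by
  intro N K A _hdom hpre
  unfold Spec_eat_apples
  rcases hpre with hK | ⟨hN, hN1, hor⟩
  · unfold eat_apples
    rw [eatLoopA_guard_false _ _ _ _ _ _ (by omega) (by omega)]
    simp only [eat_apples_alt]
    rw [if_pos (by have := min_le_left K ((A.filter (fun a => decide (0 < a))).sum); omega)]
  · have hne : A ≠ [] := by
      intro h0
      subst h0
      simp at hN
      omega
    unfold eat_apples
    rw [hN]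
    have hgood : K - 0 ≤ PS A ∨ ∀ a ∈ A, 0 ≤ a := by
      rcases hor with h | h
      · left; unfold PS; omega
      · exact Or.inr h
    have hm := main K (sumToNat A) A 0 1 (le_refl _) hgood hne (le_refl 1)
    rw [sub_zero] at hm
    rw [show (A.map Int.toNat).sum * A.length + A.length + 1
          = 1 + sumToNat A * A.length + A.length from by simp only [sumToNat]; ring]
    rw [hm, alt_eq_resultFn ((A.length : Nat) : Int) K A]
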